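-- pv_equiv track=rewrite | github.com/AbdulselamIsmail/Phishing-Attack-Lab | services/detector.py | get_num_urgent
-- ===== SOURCE A (Python) =====
-- URGENT_KEYWORDS = {
--     'urgent', 'suspended', 'locked', 'action',
--     'required', 'invoice', 'billing',"immediately",
--     "deadline", "important", "warning", "expired",
--     "unauthorized", "activity", "confirm", "suspended", "locked",
--     "payment", "refund", "transaction", "bank", "statement", "overdue",
--     "password", "reset", "login", "access", "credentials", "support"
-- }
--
-- def get_num_urgent(text : str):
--     text = text.lower()
--     count = 0
--     words = text.split()
--     for word in words:
--         # Check if any red flag is a substring of the current word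
--         if any(keyword in word for keyword in URGENT_KEYWORDS):
--             count += 1
--     return count
-- ===== SOURCE B (Python) =====
-- URGENT_KEYWORDS = {
--     'urgent', 'suspended', 'locked', 'action',
--     'required', 'invoice', 'billing', "immediately",
--     "deadline", "important", "warning", "expired",
--     "unauthorized", "activity", "confirm", "suspended", "locked",
--     "payment", "refund", "transaction", "bank", "statement", "overdue",
--     "password", "reset", "login", "access", "credentials", "support"
-- }
--
-- # Precomputed first-character dispatch index: keywords grouped by their first
-- # letter, so a word is scanned position by position and only the keywords that
-- # can start at that position are tried.
-- _BY_FIRST = {}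
-- for _k in URGENT_KEYWORDS:
--     _BY_FIRST.setdefault(_k[0], []).append(_k)
--
--
-- def _has_urgent(word):
--     for i in range(len(word)):
--         for k in _BY_FIRST.get(word[i], ()):
--             if word.startswith(k, i):
--                 return True
--     return False
--
--
-- def get_num_urgent(text: str):
--     text = text.lower()
--     return sum(1 for word in text.split() if _has_urgent(word))
-- ===== Notes on version B (the rewrite author's own statement) =====
-- stated objective: alternative
-- what changed: Instead of testing every keyword as a substring of each word, B precomputes a dict grouping keywords by first character and scans each word position by position, trying only the keywords dispatched on the current character via startswith(k, i).
import Mathlib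
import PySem

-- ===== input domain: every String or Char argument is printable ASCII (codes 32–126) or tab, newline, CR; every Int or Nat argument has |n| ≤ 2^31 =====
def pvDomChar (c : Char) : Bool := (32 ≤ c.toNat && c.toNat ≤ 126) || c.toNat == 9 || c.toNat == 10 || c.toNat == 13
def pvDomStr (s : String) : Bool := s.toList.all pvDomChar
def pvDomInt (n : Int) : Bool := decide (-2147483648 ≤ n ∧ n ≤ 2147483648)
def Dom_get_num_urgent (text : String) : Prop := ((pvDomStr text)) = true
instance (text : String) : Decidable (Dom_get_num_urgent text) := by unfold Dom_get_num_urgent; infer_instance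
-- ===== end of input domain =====

-- B replaces the per-word loop over all keywords by a precomputed first-character
-- dispatch index and a single position-by-position scan of each word (objective: alternative).

-- ===== PORT A =====
-- the URGENT_KEYWORDS set: its distinct elements (iteration order is irrelevant to the boolean `any`)
def pvKeywords : List String :=
  ["urgent", "suspended", "locked", "action", "required", "invoice", "billing",
   "immediately", "deadline", "important", "warning", "expired", "unauthorized",
   "activity", "confirm", "payment", "refund", "transaction", "bank", "statement",
   "overdue", "password", "reset", "login", "access", "credentials", "support"]

def get_num_urgent (text : String) : Int :=
  let t := PySem.Str.lower text
  (PySem.Str.split₀ t).foldl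
    (fun count word =>
      if pvKeywords.any (fun k => PySem.Str.isIn k word) then count + 1 else count) 0

-- ===== PORT B =====
-- the _BY_FIRST dict of Source B, compiled: keywords grouped by first character
def pvByFirst (c : Char) : List String :=
  if c = 'u' then ["urgent", "unauthorized"]
  else if c = 's' then ["suspended", "statement", "support"]
  else if c = 'l' then ["locked", "login"]
  else if c = 'a' then ["action", "activity", "access"]
  else if c = 'r' then ["required", "refund", "reset"]
  else if c = 'i' then ["invoice", "immediately", "important"]
  else if c = 'b' then ["billing", "bank"]
  else if c = 'd' then ["deadline"]
  else if c = 'w' then ["warning"]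
  else if c = 'e' then ["expired"]
  else if c = 'c' then ["confirm", "credentials"]
  else if c = 'p' then ["payment", "password"]
  else if c = 't' then ["transaction"]
  else if c = 'o' then ["overdue"]
  else []

-- _has_urgent: scan the word position by position; at each position try only
-- the keywords dispatched on the current character (word.startswith(k, i))
def pvHasUrgent : List Char → Bool
  | [] => false
  | c :: rest =>
    (pvByFirst c).any (fun k => k.toList.isPrefixOf (c :: rest)) || pvHasUrgent rest

def get_num_urgent_alt (text : String) : Int :=
  ((PySem.Str.split₀ (PySem.Str.lower text)).map
    (fun word => if pvHasUrgent word.toList then (1 : Int) else 0)).sum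

-- ===== PRECONDITION & SPEC =====
def Spec_get_num_urgent (text : String) (out : Int) : Prop := out = get_num_urgent_alt text
instance (text : String) (out : Int) : Decidable (Spec_get_num_urgent text out) := by unfold Spec_get_num_urgent; infer_instance

-- ===== CLAIM (what is proved, stated in full; the proofs are below) =====
def Claim_equal_get_num_urgent : Prop := ∀ (text : String), Dom_get_num_urgent text → Spec_get_num_urgent text (get_num_urgent text)

-- ===== LEMMAS AND PROOFS =====

-- every list in the dispatch index holds only keywords
theorem pvByFirst_subset (c : Char) : ∀ k ∈ pvByFirst c, k ∈ pvKeywords := by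
  by_cases h1 : c = 'u'
  · subst h1; decide
  by_cases h2 : c = 's'
  · subst h2; decide
  by_cases h3 : c = 'l'
  · subst h3; decide
  by_cases h4 : c = 'a'
  · subst h4; decide
  by_cases h5 : c = 'r'
  · subst h5; decide
  by_cases h6 : c = 'i'
  · subst h6; decide
  by_cases h7 : c = 'b'
  · subst h7; decide
  by_cases h8 : c = 'd'
  · subst h8; decide
  by_cases h9 : c = 'w'
  · subst h9; decide
  by_cases h10 : c = 'e'
  · subst h10; decide
  by_cases h11 : c = 'c'
  · subst h11; decide
  by_cases h12 : c = 'p'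
  · subst h12; decide
  by_cases h13 : c = 't'
  · subst h13; decide
  by_cases h14 : c = 'o'
  · subst h14; decide
  unfold pvByFirst
  rw [if_neg h1, if_neg h2, if_neg h3, if_neg h4, if_neg h5, if_neg h6, if_neg h7, if_neg h8, if_neg h9, if_neg h10, if_neg h11, if_neg h12, if_neg h13, if_neg h14]
  simp

-- every keyword is filed in the index under its first character
theorem pvMem_byFirst : ∀ k ∈ pvKeywords, k ∈ pvByFirst (k.toList.headD ' ') := by decide

theorem pvKeywords_ne_nil : ∀ k ∈ pvKeywords, k.toList ≠ ([] : List Char) := by decide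

theorem pvHasUrgent_iff (chars : List Char) :
    pvHasUrgent chars = true ↔ ∃ k ∈ pvKeywords, k.toList <:+: chars := by
  induction chars with
  | nil =>
    constructor
    · intro h; simp [pvHasUrgent] at h
    · rintro ⟨k, hk, hnil⟩
      rw [List.infix_nil] at hnil
      exact absurd hnil (pvKeywords_ne_nil k hk)
  | cons c rest ih =>
    simp only [pvHasUrgent, Bool.or_eq_true, List.any_eq_true, ih,
      List.isPrefixOf_iff_prefix]
    constructor
    · rintro (⟨k, hk, hp⟩ | ⟨k, hk, hi⟩)
      · exact ⟨k, pvByFirst_subset c k hk, hp.isInfix⟩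
      · exact ⟨k, hk, List.infix_cons_iff.mpr (Or.inr hi)⟩
    · rintro ⟨k, hk, hi⟩
      rcases List.infix_cons_iff.mp hi with hp | hi'
      · refine Or.inl ⟨k, ?_, hp⟩
        obtain ⟨a, kt, he⟩ := List.exists_cons_of_ne_nil (pvKeywords_ne_nil k hk)
        have hac : a = c := by rw [he] at hp; exact (List.cons_prefix_cons.mp hp).1
        have hmem := pvMem_byFirst k hk
        rwa [he, List.headD_cons, hac] at hmem
      · exact Or.inr ⟨k, hk, hi'⟩

theorem pvWord_eq (w : String) :
    pvKeywords.any (fun k => PySem.Str.isIn k w) = pvHasUrgent w.toList := by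
  rw [Bool.eq_iff_iff, List.any_eq_true, pvHasUrgent_iff]
  simp only [PySem.Str.isIn_iff_infix]

-- ===== VERDICT (by name: the statement is the Claim_ definition above) =====
theorem get_num_urgent_spec : Claim_equal_get_num_urgent := by
  intro text _
  unfold Spec_get_num_urgent get_num_urgent get_num_urgent_alt
  rw [PySem.List.foldl_if_add_one, PySem.List.sum_map_ite_one_zero, zero_add]
  congr 1
  exact List.countP_congr (fun w _ => by rw [pvWord_eq])
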